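-- pv_equiv track=rewrite | github.com/ashudnsingh/CodeSignal | Graphs/Neverending Grids/028 - horsebot.py | horsebot
-- ===== SOURCE A (Python) =====
-- def horsebot(n, m):
--     ret = 0
--     for i in range(1, max(n,m)):
--         for j in range(i, max(n,m)):
--             dx = [i, -i, i, -i, j, j, -j, -j]
--             dy = [j, j, -j, -j, i, -i, i, -i]
--             seen = {(0, 0)}
--             stack = [(0, 0)]
--             while stack:
--                 x, y = stack.pop()
--                 for z in range(8):
--                     newx = x + dx[z]
--                     if not 0 <= newx < n:
--                         continue
--                     newy = y + dy[z]
--                     if not 0 <= newy < m: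
--                         continue
--                     if newx == n-1 and newy == m-1:
--                         # End
--                         ret += 1
--                         break
--                     if (newx, newy) not in seen:
--                         seen.add((newx, newy))
--                         stack.append((newx, newy))
--                 else:
--                     continue
--                 break
--     return ret
-- ===== SOURCE B (Python) =====
-- def horsebot(n, m):
--     top = max(n, m)
--     corner = (n - 1, m - 1)
--     ret = 0
--     for i in range(1, top):
--         for j in range(i, top):
--             offs = [(i, j), (-i, j), (i, -j), (-i, -j),
--                     (j, i), (j, -i), (-j, i), (-j, -i)]
--             # saturate the set of cells reachable from (0,0) without ever
--             # standing on the corner, by breadth-first levels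
--             seen = {(0, 0)}
--             frontier = {(0, 0)}
--             while frontier:
--                 nxt = set()
--                 for (x, y) in frontier:
--                     for (dx, dy) in offs:
--                         c = (x + dx, y + dy)
--                         if 0 <= c[0] < n and 0 <= c[1] < m and c != corner and c not in seen:
--                             nxt.add(c)
--                 seen |= nxt
--                 frontier = nxt
--             # the move-type works iff some reachable cell has a move onto the corner
--             if any(0 <= x + dx < n and 0 <= y + dy < m and (x + dx, y + dy) == corner
--                    for (x, y) in seen for (dx, dy) in offs):
--                 ret += 1
--     return ret
-- ===== Notes on version B (the rewrite author's own statement) =====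
-- stated objective: alternative
-- what changed: A's per-move-type depth-first search with an explicit stack and an early break on spotting the corner is replaced by a breadth-first frontier saturation of the full reachable set followed by a single scan for a cell with a move onto the corner.
import Mathlib
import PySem

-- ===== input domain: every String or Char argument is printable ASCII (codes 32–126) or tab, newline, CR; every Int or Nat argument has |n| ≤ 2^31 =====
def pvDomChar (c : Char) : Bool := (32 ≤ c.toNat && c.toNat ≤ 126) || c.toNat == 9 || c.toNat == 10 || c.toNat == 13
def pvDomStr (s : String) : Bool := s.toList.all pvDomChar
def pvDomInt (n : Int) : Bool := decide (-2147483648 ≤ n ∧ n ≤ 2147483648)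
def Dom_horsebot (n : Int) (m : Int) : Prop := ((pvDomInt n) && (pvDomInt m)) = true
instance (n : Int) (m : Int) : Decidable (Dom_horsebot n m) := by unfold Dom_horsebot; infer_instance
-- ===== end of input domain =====

-- B replaces A's depth-first search with an early break by a breadth-first
-- saturation of the whole reachable set followed by one scan for a move onto
-- the corner (objective: alternative; same asymptotic cost).

-- ===== PORT A =====
-- Inner `for z in range(8)` of A: dx[z]/dy[z] are walked as the zipped list of
-- (dx, dy) pairs; `break` on the corner returns found = true.
def pvExpandA (n : Int) (m : Int) (x : Int × Int) (ds : List (Int × Int))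
    (seen : PySem.Set (Int × Int)) (stack : List (Int × Int)) :
    Bool × PySem.Set (Int × Int) × List (Int × Int) :=
  match ds with
  | [] => (false, seen, stack)
  | d :: rest =>
    let newx := x.1 + d.1
    if ¬ (0 ≤ newx ∧ newx < n) then pvExpandA n m x rest seen stack
    else
      let newy := x.2 + d.2
      if ¬ (0 ≤ newy ∧ newy < m) then pvExpandA n m x rest seen stack
      else if newx = n - 1 ∧ newy = m - 1 then (true, seen, stack)
      else if (newx, newy) ∈ seen then pvExpandA n m x rest seen stack
      else pvExpandA n m x rest (PySem.Set.add seen (newx, newy)) ((newx, newy) :: stack)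

-- A's `while stack`: the stack top is the list head (Python append/pop() is
-- LIFO, exactly head-cons/head-pop).  The Nat fuel only makes the loop total;
-- horsebot passes more fuel than the loop can consume.
def pvLoopA (n : Int) (m : Int) (ds : List (Int × Int)) :
    Nat → PySem.Set (Int × Int) → List (Int × Int) → Bool
  | 0, _, _ => false
  | fuel + 1, seen, stack =>
    match stack with
    | [] => false
    | x :: rest =>
      match pvExpandA n m x ds seen rest with
      | (true, _, _) => true
      | (false, seen', stack') => pvLoopA n m ds fuel seen' stack'

def horsebot (n : Int) (m : Int) : Int :=
  (PySem.List.pyRange 1 (max n m) 1).foldl (fun ret i =>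
    (PySem.List.pyRange i (max n m) 1).foldl (fun ret j =>
      let ds := List.zip [i, -i, i, -i, j, j, -j, -j] [j, j, -j, -j, i, -i, i, -i]
      if pvLoopA n m ds (9 * (n.toNat * m.toNat) + 2)
          (PySem.Set.ofList [((0 : Int), (0 : Int))]) [((0 : Int), (0 : Int))]
      then ret + 1 else ret) ret) 0

-- ===== PORT B =====
-- inner `for (dx, dy) in offs` of one frontier cell
def pvCellNxt (n : Int) (m : Int) (x : Int × Int) (ds : List (Int × Int))
    (seen : PySem.Set (Int × Int)) (nxt : PySem.Set (Int × Int)) :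
    PySem.Set (Int × Int) :=
  ds.foldl (fun nxt d =>
    let c := (x.1 + d.1, x.2 + d.2)
    if (0 ≤ c.1 ∧ c.1 < n ∧ 0 ≤ c.2 ∧ c.2 < m) ∧ c ≠ (n - 1, m - 1) ∧ c ∉ seen
    then PySem.Set.add nxt c else nxt) nxt

-- one breadth-first level: `for (x, y) in frontier`
def pvLevel (n : Int) (m : Int) (ds : List (Int × Int))
    (frontier : PySem.Set (Int × Int)) (seen : PySem.Set (Int × Int)) :
    PySem.Set (Int × Int) :=
  frontier.foldl (fun nxt x => pvCellNxt n m x ds seen nxt) PySem.Set.empty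

-- `while frontier`, returning the saturated `seen`; Nat fuel only for totality
def pvLoopB (n : Int) (m : Int) (ds : List (Int × Int)) :
    Nat → PySem.Set (Int × Int) → PySem.Set (Int × Int) → PySem.Set (Int × Int)
  | 0, seen, _ => seen
  | fuel + 1, seen, frontier =>
    match frontier with
    | [] => seen
    | _ :: _ =>
      let nxt := pvLevel n m ds frontier seen
      pvLoopB n m ds fuel (PySem.Set.union seen nxt) nxt

def horsebot_alt (n : Int) (m : Int) : Int :=
  let top := max n m
  (PySem.List.pyRange 1 top 1).foldl (fun ret i =>
    (PySem.List.pyRange i top 1).foldl (fun ret j =>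
      let offs := [(i, j), (-i, j), (i, -j), (-i, -j), (j, i), (j, -i), (-j, i), (-j, -i)]
      let seen := pvLoopB n m offs (n.toNat * m.toNat + 2)
          (PySem.Set.ofList [((0 : Int), (0 : Int))]) (PySem.Set.ofList [((0 : Int), (0 : Int))])
      if seen.any (fun c => offs.any (fun d =>
          decide ((0 ≤ c.1 + d.1 ∧ c.1 + d.1 < n ∧ 0 ≤ c.2 + d.2 ∧ c.2 + d.2 < m) ∧
                  (c.1 + d.1, c.2 + d.2) = (n - 1, m - 1))))
      then ret + 1 else ret) ret) 0

-- ===== PRECONDITION & SPEC =====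
def Spec_horsebot (n : Int) (m : Int) (out : Int) : Prop := out = horsebot_alt n m
instance (n : Int) (m : Int) (out : Int) : Decidable (Spec_horsebot n m out) := by unfold Spec_horsebot; infer_instance

-- ===== CLAIM (what is proved, stated in full; the proofs are below) =====
def Claim_equal_horsebot : Prop := ∀ (n : Int) (m : Int), Dom_horsebot n m → Spec_horsebot n m (horsebot n m)

-- ===== LEMMAS AND PROOFS =====

-- The common abstract graph: one leaper move that lands in bounds and not on
-- the corner; reachability from (0,0); "has a move onto the corner".
def pvInbP (n m : Int) (c : Int × Int) : Prop := 0 ≤ c.1 ∧ c.1 < n ∧ 0 ≤ c.2 ∧ c.2 < m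
def pvStep (n m : Int) (ds : List (Int × Int)) (a b : Int × Int) : Prop :=
  ∃ d ∈ ds, b = (a.1 + d.1, a.2 + d.2) ∧ pvInbP n m b ∧ b ≠ (n - 1, m - 1)
def pvReach (n m : Int) (ds : List (Int × Int)) (c : Int × Int) : Prop :=
  Relation.ReflTransGen (pvStep n m ds) ((0 : Int), (0 : Int)) c
def pvAdjC (n m : Int) (ds : List (Int × Int)) (c : Int × Int) : Prop :=
  ∃ d ∈ ds, pvInbP n m (c.1 + d.1, c.2 + d.2) ∧ (c.1 + d.1, c.2 + d.2) = (n - 1, m - 1)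
def pvGood (n m : Int) (ds : List (Int × Int)) : Prop :=
  ∃ c, pvReach n m ds c ∧ pvAdjC n m ds c

noncomputable def pvGrid (n m : Int) : Finset (Int × Int) := Finset.Ico 0 n ×ˢ Finset.Ico 0 m
noncomputable def pvUnseen (n m : Int) (seen : List (Int × Int)) : Nat :=
  (pvGrid n m \ seen.toFinset).card

lemma pv_mem_grid (n m : Int) (c : Int × Int) : c ∈ pvGrid n m ↔ pvInbP n m c := by
  simp [pvGrid, Finset.mem_product, Finset.mem_Ico, pvInbP, and_assoc]

lemma pv_grid_card (n m : Int) : (pvGrid n m).card = n.toNat * m.toNat := by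
  simp [pvGrid, Finset.card_product, Int.card_Ico]

lemma pv_closed_reach (n m : Int) (ds : List (Int × Int)) (S : List (Int × Int))
    (h0 : ((0 : Int), (0 : Int)) ∈ S)
    (hcl : ∀ c ∈ S, ∀ b, pvStep n m ds c b → b ∈ S) :
    ∀ c, pvReach n m ds c → c ∈ S := by
  intro c h
  induction h with
  | refl => exact h0
  | tail _ hstep ih => exact hcl _ ih _ hstep

def pvInvA (n m : Int) (ds : List (Int × Int)) (seen stack : List (Int × Int)) : Prop :=
  (((0 : Int), (0 : Int)) ∈ seen) ∧ (∀ c ∈ stack, c ∈ seen) ∧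
  (∀ c ∈ seen, pvReach n m ds c) ∧
  (∀ c ∈ seen, c ∉ stack → ¬ pvAdjC n m ds c ∧ ∀ b, pvStep n m ds c b → b ∈ seen)

lemma pv_unseen_add (n m : Int) (seen : List (Int × Int)) (c : Int × Int)
    (hin : pvInbP n m c) (hs : c ∉ seen) :
    pvUnseen n m (PySem.Set.add seen c) + 1 = pvUnseen n m seen := by
  have hmem : c ∈ pvGrid n m \ seen.toFinset := by
    rw [Finset.mem_sdiff, pv_mem_grid]
    exact ⟨hin, by simpa using hs⟩
  rw [PySem.Set.add_of_not_mem hs]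
  unfold pvUnseen
  rw [show (seen ++ [c]).toFinset = insert c seen.toFinset by
        simp [List.toFinset_append],
      Finset.sdiff_insert, Finset.card_erase_add_one hmem]

lemma pv_expandA_spec (n m : Int) (x : Int × Int) :
    ∀ (ds : List (Int × Int)) (seen stack : List (Int × Int)),
    (∀ c ∈ seen, c ∈ (pvExpandA n m x ds seen stack).2.1) ∧
    (∀ c ∈ (pvExpandA n m x ds seen stack).2.1,
        c ∈ seen ∨ ∃ d ∈ ds, c = (x.1 + d.1, x.2 + d.2) ∧ pvInbP n m c ∧ c ≠ (n - 1, m - 1)) ∧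
    (∀ c ∈ stack, c ∈ (pvExpandA n m x ds seen stack).2.2) ∧
    (∀ c ∈ (pvExpandA n m x ds seen stack).2.2, c ∈ stack ∨ c ∈ (pvExpandA n m x ds seen stack).2.1) ∧
    (∀ c ∈ (pvExpandA n m x ds seen stack).2.1, c ∉ seen → c ∈ (pvExpandA n m x ds seen stack).2.2) ∧
    (9 * pvUnseen n m (pvExpandA n m x ds seen stack).2.1 + (pvExpandA n m x ds seen stack).2.2.length
        ≤ 9 * pvUnseen n m seen + stack.length) ∧
    ((pvExpandA n m x ds seen stack).1 = true →
        ∃ d ∈ ds, pvInbP n m (x.1 + d.1, x.2 + d.2) ∧ (x.1 + d.1, x.2 + d.2) = (n - 1, m - 1)) ∧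
    ((pvExpandA n m x ds seen stack).1 = false →
        ∀ d ∈ ds, (¬ (pvInbP n m (x.1 + d.1, x.2 + d.2) ∧ (x.1 + d.1, x.2 + d.2) = (n - 1, m - 1))) ∧
          (pvInbP n m (x.1 + d.1, x.2 + d.2) → (x.1 + d.1, x.2 + d.2) ≠ (n - 1, m - 1) →
            (x.1 + d.1, x.2 + d.2) ∈ (pvExpandA n m x ds seen stack).2.1)) := by
  intro ds
  induction ds with
  | nil =>
    intro seen stack
    refine ⟨fun c hc => hc, fun c hc => Or.inl hc, fun c hc => hc,
      fun c hc => Or.inl hc, ?_, le_refl _, ?_, ?_⟩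
    · intro c hc hcs; exact absurd hc hcs
    · intro h; simp [pvExpandA] at h
    · intro _ d hd; simp at hd
  | cons d rest ih =>
    intro seen stack
    simp only [pvExpandA]
    by_cases h1 : 0 ≤ x.1 + d.1 ∧ x.1 + d.1 < n
    · rw [if_neg (not_not_intro h1)]
      by_cases h2 : 0 ≤ x.2 + d.2 ∧ x.2 + d.2 < m
      · rw [if_neg (not_not_intro h2)]
        by_cases h3 : x.1 + d.1 = n - 1 ∧ x.2 + d.2 = m - 1
        · rw [if_pos h3]
          refine ⟨fun c hc => hc, fun c hc => Or.inl hc, fun c hc => hc,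
            fun c hc => Or.inl hc, fun c hc hcs => absurd hc hcs, le_refl _, ?_, ?_⟩
          · intro _
            exact ⟨d, List.mem_cons_self, ⟨h1.1, h1.2, h2.1, h2.2⟩,
              Prod.ext_iff.mpr ⟨h3.1, h3.2⟩⟩
          · intro hf; simp at hf
        · rw [if_neg h3]
          by_cases h4 : (x.1 + d.1, x.2 + d.2) ∈ seen
          · rw [if_pos h4]
            obtain ⟨e1, e2, e3, e4, e5, e6, e7, e8⟩ := ih seen stack
            refine ⟨e1, ?_, e3, e4, e5, e6, ?_, ?_⟩
            · intro c hc
              rcases e2 c hc with h | ⟨d', hd', hrest⟩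
              · exact Or.inl h
              · exact Or.inr ⟨d', List.mem_cons_of_mem _ hd', hrest⟩
            · intro hf
              obtain ⟨d', hd', hrest⟩ := e7 hf
              exact ⟨d', List.mem_cons_of_mem _ hd', hrest⟩
            · intro hf d' hd'
              rcases List.mem_cons.mp hd' with rfl | hd'
              · constructor
                · rintro ⟨_, hcor⟩
                  exact h3 ⟨congrArg Prod.fst hcor, congrArg Prod.snd hcor⟩
                · intro _ _; exact e1 _ h4
              · exact e8 hf d' hd'
          · rw [if_neg h4]
            have hin : pvInbP n m (x.1 + d.1, x.2 + d.2) := ⟨h1.1, h1.2, h2.1, h2.2⟩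
            have hne : (x.1 + d.1, x.2 + d.2) ≠ (n - 1, m - 1) := by
              intro hcor
              exact h3 ⟨congrArg Prod.fst hcor, congrArg Prod.snd hcor⟩
            obtain ⟨e1, e2, e3, e4, e5, e6, e7, e8⟩ :=
              ih (PySem.Set.add seen (x.1 + d.1, x.2 + d.2)) ((x.1 + d.1, x.2 + d.2) :: stack)
            have hcmem : (x.1 + d.1, x.2 + d.2) ∈
                (pvExpandA n m x rest (PySem.Set.add seen (x.1 + d.1, x.2 + d.2))
                  ((x.1 + d.1, x.2 + d.2) :: stack)).2.1 :=
              e1 _ ((PySem.Set.mem_add _ _ _).mpr (Or.inr rfl))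
            refine ⟨?_, ?_, ?_, ?_, ?_, ?_, ?_, ?_⟩
            · intro c hc; exact e1 c ((PySem.Set.mem_add _ _ _).mpr (Or.inl hc))
            · intro c hc
              rcases e2 c hc with h | ⟨d', hd', hrest⟩
              · rcases (PySem.Set.mem_add _ _ _).mp h with h' | rfl
                · exact Or.inl h'
                · exact Or.inr ⟨d, List.mem_cons_self, rfl, hin, hne⟩
              · exact Or.inr ⟨d', List.mem_cons_of_mem _ hd', hrest⟩
            · intro c hc; exact e3 c (List.mem_cons_of_mem _ hc)
            · intro c hc
              rcases e4 c hc with h | h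
              · rcases List.mem_cons.mp h with rfl | h'
                · exact Or.inr hcmem
                · exact Or.inl h'
              · exact Or.inr h
            · intro c hc hcs
              by_cases hceq : c = (x.1 + d.1, x.2 + d.2)
              · subst hceq; exact e3 _ (List.mem_cons_self)
              · refine e5 c hc ?_
                intro hmem
                rcases (PySem.Set.mem_add _ _ _).mp hmem with h' | h'
                · exact hcs h'
                · exact hceq h'
            · have hstep : pvUnseen n m (PySem.Set.add seen (x.1 + d.1, x.2 + d.2)) + 1
                  = pvUnseen n m seen := pv_unseen_add n m seen _ hin h4
              have := e6
              simp only [List.length_cons] at this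
              omega
            · intro hf
              obtain ⟨d', hd', hrest⟩ := e7 hf
              exact ⟨d', List.mem_cons_of_mem _ hd', hrest⟩
            · intro hf d' hd'
              rcases List.mem_cons.mp hd' with rfl | hd'
              · exact ⟨fun h => hne h.2, fun _ _ => hcmem⟩
              · exact e8 hf d' hd'
      · rw [if_pos h2]
        obtain ⟨e1, e2, e3, e4, e5, e6, e7, e8⟩ := ih seen stack
        refine ⟨e1, ?_, e3, e4, e5, e6, ?_, ?_⟩
        · intro c hc
          rcases e2 c hc with h | ⟨d', hd', hrest⟩
          · exact Or.inl h
          · exact Or.inr ⟨d', List.mem_cons_of_mem _ hd', hrest⟩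
        · intro hf
          obtain ⟨d', hd', hrest⟩ := e7 hf
          exact ⟨d', List.mem_cons_of_mem _ hd', hrest⟩
        · intro hf d' hd'
          rcases List.mem_cons.mp hd' with rfl | hd'
          · constructor
            · rintro ⟨⟨_, _, hc, hd''⟩, _⟩; exact h2 ⟨hc, hd''⟩
            · intro hin; exact absurd ⟨hin.2.2.1, hin.2.2.2⟩ h2
          · exact e8 hf d' hd'
    · rw [if_pos h1]
      obtain ⟨e1, e2, e3, e4, e5, e6, e7, e8⟩ := ih seen stack
      refine ⟨e1, ?_, e3, e4, e5, e6, ?_, ?_⟩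
      · intro c hc
        rcases e2 c hc with h | ⟨d', hd', hrest⟩
        · exact Or.inl h
        · exact Or.inr ⟨d', List.mem_cons_of_mem _ hd', hrest⟩
      · intro hf
        obtain ⟨d', hd', hrest⟩ := e7 hf
        exact ⟨d', List.mem_cons_of_mem _ hd', hrest⟩
      · intro hf d' hd'
        rcases List.mem_cons.mp hd' with rfl | hd'
        · constructor
          · rintro ⟨⟨ha, hb, _⟩, _⟩; exact h1 ⟨ha, hb⟩
          · intro hin; exact absurd ⟨hin.1, hin.2.1⟩ h1
        · exact e8 hf d' hd'

lemma pv_loopA_spec (n m : Int) (ds : List (Int × Int)) :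
    ∀ (fuel : Nat) (seen stack : List (Int × Int)), pvInvA n m ds seen stack →
    9 * pvUnseen n m seen + stack.length + 1 ≤ fuel →
    (pvLoopA n m ds fuel seen stack = true ↔ pvGood n m ds) := by
  intro fuel
  induction fuel with
  | zero => intro seen stack _ hle; omega
  | succ f ih =>
    intro seen stack hinv hle
    obtain ⟨h0, hss, hreach, hcl⟩ := hinv
    cases stack with
    | nil =>
      simp only [pvLoopA]
      constructor
      · intro h; exact absurd h (by simp)
      · rintro ⟨c, hr, ha⟩
        have hc : c ∈ seen :=
          pv_closed_reach n m ds seen h0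
            (fun c' hc' b hb => (hcl c' hc' (by simp)).2 b hb) c hr
        exact absurd ha (hcl c hc (by simp)).1
    | cons x rest =>
      simp only [pvLoopA]
      obtain ⟨e1, e2, e3, e4, e5, e6, e7, e8⟩ := pv_expandA_spec n m x ds seen rest
      rcases hE : pvExpandA n m x ds seen rest with ⟨found, seen', stack'⟩
      rw [hE] at e1 e2 e3 e4 e5 e6 e7 e8
      simp only at e1 e2 e3 e4 e5 e6 e7 e8
      have hx : x ∈ seen := hss x (List.mem_cons_self)
      cases found with
      | true =>
        exact ⟨fun _ => ⟨x, hreach x hx, e7 rfl⟩, fun _ => rfl⟩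
      | false =>
        have he8 := e8 rfl
        apply ih seen' stack'
        · refine ⟨e1 _ h0, ?_, ?_, ?_⟩
          · intro c hc
            rcases e4 c hc with h | h
            · exact e1 c (hss c (List.mem_cons_of_mem _ h))
            · exact h
          · intro c hc
            rcases e2 c hc with h | ⟨d, hd, rfl, hin, hne⟩
            · exact hreach c h
            · exact Relation.ReflTransGen.tail (hreach x hx) ⟨d, hd, rfl, hin, hne⟩
          · intro c hc hcs
            have hcseen : c ∈ seen := by
              by_contra hnot
              exact hcs (e5 c hc hnot)
            by_cases hcx : c = x
            · subst hcx
              constructor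
              · rintro ⟨d, hd, hin, hcor⟩
                exact (he8 d hd).1 ⟨hin, hcor⟩
              · rintro b ⟨d, hd, rfl, hin, hne⟩
                exact (he8 d hd).2 hin hne
            · have hcrest : c ∉ rest := fun h => hcs (e3 c h)
              have := hcl c hcseen (by
                intro h
                rcases List.mem_cons.mp h with h' | h'
                · exact hcx h'
                · exact hcrest h')
              exact ⟨this.1, fun b hb => e1 b (this.2 b hb)⟩
        · simp only [List.length_cons] at hle
          omega

def pvInvB (n m : Int) (ds : List (Int × Int)) (seen frontier : List (Int × Int)) : Prop :=
  (((0 : Int), (0 : Int)) ∈ seen) ∧ (∀ c ∈ frontier, c ∈ seen) ∧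
  (∀ c ∈ seen, pvReach n m ds c) ∧
  (∀ c ∈ seen, c ∉ frontier → ∀ b, pvStep n m ds c b → b ∈ seen)

lemma pv_cellNxt_spec (n m : Int) (x : Int × Int) (seen : List (Int × Int)) :
    ∀ (ds : List (Int × Int)) (nxt : List (Int × Int)),
    (∀ c ∈ nxt, c ∈ pvCellNxt n m x ds seen nxt) ∧
    (∀ c ∈ pvCellNxt n m x ds seen nxt,
        c ∈ nxt ∨ (pvStep n m ds x c ∧ c ∉ seen)) ∧
    (∀ d ∈ ds, pvInbP n m (x.1 + d.1, x.2 + d.2) → (x.1 + d.1, x.2 + d.2) ≠ (n - 1, m - 1) →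
        (x.1 + d.1, x.2 + d.2) ∉ seen → (x.1 + d.1, x.2 + d.2) ∈ pvCellNxt n m x ds seen nxt) ∧
    (nxt.Nodup → (pvCellNxt n m x ds seen nxt).Nodup) := by
  intro ds
  induction ds with
  | nil =>
    intro nxt
    refine ⟨fun c hc => hc, fun c hc => Or.inl hc, ?_, fun h => h⟩
    intro d hd; simp at hd
  | cons d rest ih =>
    intro nxt
    simp only [pvCellNxt, List.foldl_cons] at *
    by_cases hcond : (0 ≤ x.1 + d.1 ∧ x.1 + d.1 < n ∧ 0 ≤ x.2 + d.2 ∧ x.2 + d.2 < m) ∧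
        (x.1 + d.1, x.2 + d.2) ≠ (n - 1, m - 1) ∧ (x.1 + d.1, x.2 + d.2) ∉ seen
    · rw [if_pos hcond]
      obtain ⟨i1, i2, i3, i4⟩ := ih (PySem.Set.add nxt (x.1 + d.1, x.2 + d.2))
      refine ⟨?_, ?_, ?_, ?_⟩
      · intro c hc; exact i1 c ((PySem.Set.mem_add _ _ _).mpr (Or.inl hc))
      · intro c hc
        rcases i2 c hc with h | ⟨⟨d', hd', hstep⟩, hns⟩
        · rcases (PySem.Set.mem_add _ _ _).mp h with h' | rfl
          · exact Or.inl h'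
          · exact Or.inr ⟨⟨d, List.mem_cons_self, rfl, hcond.1, hcond.2.1⟩, hcond.2.2⟩
        · exact Or.inr ⟨⟨d', List.mem_cons_of_mem _ hd', hstep⟩, hns⟩
      · intro d' hd' hin hne hns
        rcases List.mem_cons.mp hd' with rfl | hd'
        · exact i1 _ ((PySem.Set.mem_add _ _ _).mpr (Or.inr rfl))
        · exact i3 d' hd' hin hne hns
      · intro hnd; exact i4 (PySem.Set.nodup_add _ _ hnd)
    · rw [if_neg hcond]
      obtain ⟨i1, i2, i3, i4⟩ := ih nxt
      refine ⟨i1, ?_, ?_, i4⟩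
      · intro c hc
        rcases i2 c hc with h | ⟨⟨d', hd', hstep⟩, hns⟩
        · exact Or.inl h
        · exact Or.inr ⟨⟨d', List.mem_cons_of_mem _ hd', hstep⟩, hns⟩
      · intro d' hd' hin hne hns
        rcases List.mem_cons.mp hd' with rfl | hd'
        · exact absurd ⟨⟨hin.1, hin.2.1, hin.2.2.1, hin.2.2.2⟩, hne, hns⟩ hcond
        · exact i3 d' hd' hin hne hns

lemma pv_level_spec (n m : Int) (ds : List (Int × Int)) (seen : List (Int × Int)) :
    ∀ (frontier acc : List (Int × Int)),
    (∀ c ∈ acc, c ∈ frontier.foldl (fun nxt x => pvCellNxt n m x ds seen nxt) acc) ∧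
    (∀ c ∈ frontier.foldl (fun nxt x => pvCellNxt n m x ds seen nxt) acc,
        c ∈ acc ∨ ((∃ y ∈ frontier, pvStep n m ds y c) ∧ c ∉ seen)) ∧
    (∀ y ∈ frontier, ∀ b, pvStep n m ds y b →
        b ∈ seen ∨ b ∈ frontier.foldl (fun nxt x => pvCellNxt n m x ds seen nxt) acc) ∧
    (acc.Nodup → (frontier.foldl (fun nxt x => pvCellNxt n m x ds seen nxt) acc).Nodup) := by
  intro frontier
  induction frontier with
  | nil =>
    intro acc
    refine ⟨fun c hc => hc, fun c hc => Or.inl hc, ?_, fun h => h⟩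
    intro y hy; simp at hy
  | cons y fr ih =>
    intro acc
    simp only [List.foldl_cons]
    obtain ⟨c1, c2, c3, c4⟩ := pv_cellNxt_spec n m y seen ds acc
    obtain ⟨i1, i2, i3, i4⟩ := ih (pvCellNxt n m y ds seen acc)
    refine ⟨?_, ?_, ?_, ?_⟩
    · intro c hc; exact i1 c (c1 c hc)
    · intro c hc
      rcases i2 c hc with h | ⟨⟨y', hy', hstep⟩, hns⟩
      · rcases c2 c h with h' | ⟨hstep, hns⟩
        · exact Or.inl h'
        · exact Or.inr ⟨⟨y, List.mem_cons_self, hstep⟩, hns⟩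
      · exact Or.inr ⟨⟨y', List.mem_cons_of_mem _ hy', hstep⟩, hns⟩
    · intro y' hy' b hb
      rcases List.mem_cons.mp hy' with rfl | hy'
      · by_cases hbs : b ∈ seen
        · exact Or.inl hbs
        · obtain ⟨d, hd, rfl, hin, hne⟩ := hb
          exact Or.inr (i1 _ (c3 d hd hin hne hbs))
      · exact i3 y' hy' b hb
    · intro hnd; exact i4 (c4 hnd)

lemma pv_unseen_union (n m : Int) (nxt : List (Int × Int)) :
    ∀ (seen : List (Int × Int)), nxt.Nodup →
    (∀ c ∈ nxt, pvInbP n m c ∧ c ∉ seen) →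
    pvUnseen n m (PySem.Set.union seen nxt) + nxt.length = pvUnseen n m seen := by
  induction nxt with
  | nil => intro seen _ _; simp [PySem.Set.union]
  | cons c cs ihc =>
    intro seen hnd hsub
    have hc := hsub c (List.mem_cons_self)
    have hstep : pvUnseen n m (PySem.Set.add seen c) + 1 = pvUnseen n m seen :=
      pv_unseen_add n m seen c hc.1 hc.2
    have hrec := ihc (PySem.Set.add seen c) (List.Nodup.of_cons hnd) (by
      intro c' hc'
      refine ⟨(hsub c' (List.mem_cons_of_mem _ hc')).1, ?_⟩
      intro hmem
      rcases (PySem.Set.mem_add _ _ _).mp hmem with h | rfl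
      · exact (hsub c' (List.mem_cons_of_mem _ hc')).2 h
      · exact (List.nodup_cons.mp hnd).1 hc')
    have hcons : PySem.Set.union seen (c :: cs) = PySem.Set.union (PySem.Set.add seen c) cs := by
      simp [PySem.Set.union, PySem.Set.update_cons]
    rw [hcons, List.length_cons]
    omega

lemma pv_loopB_spec (n m : Int) (ds : List (Int × Int)) :
    ∀ (fuel : Nat) (seen frontier : List (Int × Int)), pvInvB n m ds seen frontier →
    frontier.Nodup →
    pvUnseen n m seen + frontier.length + 1 ≤ fuel →
    (((0 : Int), (0 : Int)) ∈ pvLoopB n m ds fuel seen frontier) ∧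
    (∀ c ∈ pvLoopB n m ds fuel seen frontier, pvReach n m ds c) ∧
    (∀ c ∈ pvLoopB n m ds fuel seen frontier, ∀ b, pvStep n m ds c b →
        b ∈ pvLoopB n m ds fuel seen frontier) := by
  intro fuel
  induction fuel with
  | zero => intro seen frontier _ _ hle; omega
  | succ f ih =>
    intro seen frontier hinv hnd hle
    obtain ⟨h0, hfs, hreach, hcl⟩ := hinv
    cases frontier with
    | nil =>
      simp only [pvLoopB]
      exact ⟨h0, hreach, fun c hc b hb => (hcl c hc (by simp)) b hb⟩
    | cons y fr =>
      simp only [pvLoopB]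
      obtain ⟨l1, l2, l3, l4⟩ := pv_level_spec n m ds seen (y :: fr) []
      have hnew : ∀ c ∈ pvLevel n m ds (y :: fr) seen,
          (∃ y' ∈ y :: fr, pvStep n m ds y' c) ∧ c ∉ seen := by
        intro c hc
        rcases l2 c hc with h | h
        · simp at h
        · exact h
      have hndn : (pvLevel n m ds (y :: fr) seen).Nodup := l4 List.nodup_nil
      have huni : pvUnseen n m (PySem.Set.union seen (pvLevel n m ds (y :: fr) seen))
          + (pvLevel n m ds (y :: fr) seen).length = pvUnseen n m seen := by
        apply pv_unseen_union
        · exact hndn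
        · intro c hc
          obtain ⟨⟨y', _, d, _, rfl, hin, _⟩, hns⟩ := hnew c hc
          exact ⟨hin, hns⟩
      apply ih
      · refine ⟨(PySem.Set.mem_union _ _ _).mpr (Or.inl h0), ?_, ?_, ?_⟩
        · intro c hc; exact (PySem.Set.mem_union _ _ _).mpr (Or.inr hc)
        · intro c hc
          rcases (PySem.Set.mem_union _ _ _).mp hc with h | h
          · exact hreach c h
          · obtain ⟨⟨y', hy', hstep⟩, _⟩ := hnew c h
            exact Relation.ReflTransGen.tail (hreach y' (hfs y' hy')) hstep
        · intro c hc hcn b hb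
          have hcs : c ∈ seen := by
            rcases (PySem.Set.mem_union _ _ _).mp hc with h | h
            · exact h
            · exact absurd h hcn
          by_cases hcf : c ∈ y :: fr
          · rcases l3 c hcf b hb with h | h
            · exact (PySem.Set.mem_union _ _ _).mpr (Or.inl h)
            · exact (PySem.Set.mem_union _ _ _).mpr (Or.inr h)
          · exact (PySem.Set.mem_union _ _ _).mpr (Or.inl (hcl c hcs hcf b hb))
      · exact hndn
      · simp only [List.length_cons] at hle
        omega

lemma pv_bit_eq (n m i j : Int) :
    pvLoopA n m (List.zip [i, -i, i, -i, j, j, -j, -j] [j, j, -j, -j, i, -i, i, -i])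
        (9 * (n.toNat * m.toNat) + 2)
        (PySem.Set.ofList [((0 : Int), (0 : Int))]) [((0 : Int), (0 : Int))]
      = (pvLoopB n m [(i, j), (-i, j), (i, -j), (-i, -j), (j, i), (j, -i), (-j, i), (-j, -i)]
            (n.toNat * m.toNat + 2)
            (PySem.Set.ofList [((0 : Int), (0 : Int))]) (PySem.Set.ofList [((0 : Int), (0 : Int))])).any
          (fun c => [(i, j), (-i, j), (i, -j), (-i, -j), (j, i), (j, -i), (-j, i), (-j, -i)].any (fun d =>
            decide ((0 ≤ c.1 + d.1 ∧ c.1 + d.1 < n ∧ 0 ≤ c.2 + d.2 ∧ c.2 + d.2 < m) ∧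
                    (c.1 + d.1, c.2 + d.2) = (n - 1, m - 1)))) := by
  have hzip : List.zip [i, -i, i, -i, j, j, -j, -j] [j, j, -j, -j, i, -i, i, -i]
      = [(i, j), (-i, j), (i, -j), (-i, -j), (j, i), (j, -i), (-j, i), (-j, -i)] := rfl
  have h00 : PySem.Set.ofList [((0 : Int), (0 : Int))] = [((0 : Int), (0 : Int))] := rfl
  rw [hzip, h00]
  set ds := [(i, j), (-i, j), (i, -j), (-i, -j), (j, i), (j, -i), (-j, i), (-j, -i)] with hds
  have hub : pvUnseen n m [((0 : Int), (0 : Int))] ≤ n.toNat * m.toNat := by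
    unfold pvUnseen
    calc (pvGrid n m \ [((0 : Int), (0 : Int))].toFinset).card
        ≤ (pvGrid n m).card := Finset.card_le_card Finset.sdiff_subset
      _ = n.toNat * m.toNat := pv_grid_card n m
  have hreach0 : ∀ c ∈ [((0 : Int), (0 : Int))], pvReach n m ds c := by
    intro c hc
    rcases List.mem_singleton.mp hc with rfl
    exact Relation.ReflTransGen.refl
  have hA : pvLoopA n m ds (9 * (n.toNat * m.toNat) + 2)
      [((0 : Int), (0 : Int))] [((0 : Int), (0 : Int))] = true ↔ pvGood n m ds := by
    apply pv_loopA_spec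
    · refine ⟨List.mem_singleton.mpr rfl, fun c hc => hc, hreach0, ?_⟩
      intro c hc hcs
      exact absurd hc hcs
    · simp only [List.length_singleton]
      omega
  obtain ⟨b0, bsound, bclosed⟩ := pv_loopB_spec n m ds (n.toNat * m.toNat + 2)
      [((0 : Int), (0 : Int))] [((0 : Int), (0 : Int))]
      ⟨List.mem_singleton.mpr rfl, fun c hc => hc, hreach0, fun c hc hcs => absurd hc hcs⟩
      (List.nodup_singleton _)
      (by simp only [List.length_singleton]; omega)
  have hB : ((pvLoopB n m ds (n.toNat * m.toNat + 2)
        [((0 : Int), (0 : Int))] [((0 : Int), (0 : Int))]).any (fun c => ds.any (fun d =>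
          decide ((0 ≤ c.1 + d.1 ∧ c.1 + d.1 < n ∧ 0 ≤ c.2 + d.2 ∧ c.2 + d.2 < m) ∧
                  (c.1 + d.1, c.2 + d.2) = (n - 1, m - 1)))) = true) ↔ pvGood n m ds := by
    rw [List.any_eq_true]
    constructor
    · rintro ⟨c, hc, hany⟩
      rw [List.any_eq_true] at hany
      obtain ⟨d, hd, hdec⟩ := hany
      rw [decide_eq_true_eq] at hdec
      exact ⟨c, bsound c hc, ⟨d, hd, hdec.1, hdec.2⟩⟩
    · rintro ⟨c, hr, d, hd, hin, hcor⟩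
      refine ⟨c, pv_closed_reach n m ds _ b0 bclosed c hr, ?_⟩
      rw [List.any_eq_true]
      exact ⟨d, hd, by rw [decide_eq_true_eq]; exact ⟨hin, hcor⟩⟩
  rw [Bool.eq_iff_iff]
  rw [hA, hB]

-- ===== VERDICT (by name: the statement is the Claim_ definition above) =====
theorem horsebot_spec : Claim_equal_horsebot := by
  intro n m _
  unfold Spec_horsebot horsebot horsebot_alt
  dsimp only
  apply PySem.List.foldl_congr_mem
  intro ret i _
  apply PySem.List.foldl_congr_mem
  intro ret' j _
  rw [pv_bit_eq n m i j]
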